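-- pv_equiv track=rewrite | github.com/mavdian14/Portfolio | Problem Solving/Greedy/Sherlock and MiniMax.py | sherlockAndMinimax
-- ===== SOURCE A (Python) =====
-- def sherlockAndMinimax(arr, p, q):
--     arr.sort()
--
--     maxInd = p
--     minimum = float('inf')
--     for ele in arr:
--         if abs(ele-p)<minimum:
--             minimum = abs(ele-p)
--     maximum = minimum
--
--     minimum = float('inf')
--     for i in range(1,len(arr)):
--         mid = (arr[i]+arr[i-1])//2
--         if p<mid<q:
--             minimum = min(mid-arr[i-1],arr[i]-mid)
--             if minimum>maximum:
--                 maximum = minimum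
--                 maxInd = mid
--
--     minimum = float('inf')
--     for ele in arr:
--         if abs(ele-q)<minimum:
--             minimum = abs(ele-q)
--     if minimum>maximum:
--         maximum = minimum
--         maxInd = q
--
--     return maxInd
-- ===== SOURCE B (Python) =====
-- def sherlockAndMinimax(arr, p, q):
--     arr.sort()
--
--     def value(c):
--         return min((abs(e - c) for e in arr), default=float('inf'))
--
--     mids = [m for m in ((a + b) // 2 for a, b in zip(arr, arr[1:])) if p < m < q]
--     return max([p] + mids + [q], key=value)
-- ===== Notes on version B (the rewrite author's own statement) =====
-- stated objective: simpler
-- what changed: Replaces A's three hand-rolled min/max tracking loops by one candidate list ([p] + in-range floor midpoints + [q]) and a single max(..., key=nearest-element-distance); max's first-wins tie-break reproduces A's strictly-greater updates.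
import Mathlib
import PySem

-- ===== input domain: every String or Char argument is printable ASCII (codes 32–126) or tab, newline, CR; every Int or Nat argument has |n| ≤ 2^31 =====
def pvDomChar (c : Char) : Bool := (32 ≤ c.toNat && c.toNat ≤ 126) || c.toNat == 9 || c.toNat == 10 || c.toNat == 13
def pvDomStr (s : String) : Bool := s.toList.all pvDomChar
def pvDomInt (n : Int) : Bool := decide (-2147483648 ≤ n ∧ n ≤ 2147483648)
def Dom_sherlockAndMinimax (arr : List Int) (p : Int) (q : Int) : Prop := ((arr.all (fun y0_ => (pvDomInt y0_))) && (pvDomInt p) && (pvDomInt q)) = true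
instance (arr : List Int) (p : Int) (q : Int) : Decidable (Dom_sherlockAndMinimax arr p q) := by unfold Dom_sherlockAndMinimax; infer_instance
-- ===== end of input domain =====

-- B replaces A's three hand-rolled min/max tracking loops by one candidate list and a
-- single max-by-key pass (objective: simpler). Both Pythons sort arr in place; the
-- equivalence proved here is about the RETURN value (the mutation is identical anyway).

-- ===== PORT A =====
-- "x < minimum" where minimum starts at float('inf'): none plays inf
def pvOLt (x : Int) (m : Option Int) : Bool :=
  match m with
  | none => true
  | some v => decide (x < v)

-- "x > maximum" where either side may still be float('inf') (= none)
def pvOGt (x m : Option Int) : Bool :=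
  match x, m with
  | none, none => false
  | none, some _ => true
  | some _, none => false
  | some a, some b => decide (b < a)

-- the two identical 'for ele in arr: if abs(ele-c)<minimum: minimum = abs(ele-c)' loops
def pvAMinLoop (s : List Int) (c : Int) : Option Int :=
  s.foldl (fun m e => if pvOLt |e - c| m then some |e - c| else m) none

def sherlockAndMinimax (arr : List Int) (p : Int) (q : Int) : Int :=
  let s := PySem.List.sorted arr (fun x => x) false
  let maximum := pvAMinLoop s p
  -- for i in range(1, len(arr)): state = (maxInd, maximum); minimum is (re)assigned
  -- before every use inside the body, so it is a body-local value
  let st := (PySem.List.pyRange 1 (s.length : Int) 1).foldl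
    (fun (st : Int × Option Int) i =>
      let mid := PySem.Int.floordiv (PySem.List.pyGetD s i 0 + PySem.List.pyGetD s (i - 1) 0) 2
      if p < mid ∧ mid < q then
        let minimum := some (min (mid - PySem.List.pyGetD s (i - 1) 0) (PySem.List.pyGetD s i 0 - mid))
        if pvOGt minimum st.2 then (mid, minimum) else st
      else st)
    (p, maximum)
  let m3 := pvAMinLoop s q
  if pvOGt m3 st.2 then q else st.1

-- ===== PORT B =====
-- value(c) = min((abs(e-c) for e in arr), default=float('inf'))
def pvValue (s : List Int) (c : Int) : Option Int :=
  s.foldl (fun m e => match m with | none => some |e - c| | some v => some (min v |e - c|)) none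

-- max(x :: rest, key=key): first element wins ties
def pvMaxKey (key : Int → Option Int) (x : Int) (rest : List Int) : Int :=
  (rest.foldl (fun (st : Int × Option Int) c =>
      let k := key c
      if pvOGt k st.2 then (c, k) else st)
    (x, key x)).1

def sherlockAndMinimax_alt (arr : List Int) (p : Int) (q : Int) : Int :=
  let s := PySem.List.sorted arr (fun x => x) false
  let mids := (s.zip s.tail).filterMap (fun ab =>
    let m := PySem.Int.floordiv (ab.1 + ab.2) 2
    if p < m ∧ m < q then some m else none)
  pvMaxKey (pvValue s) p (mids ++ [q])

-- ===== PRECONDITION & SPEC =====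
def Spec_sherlockAndMinimax (arr : List Int) (p : Int) (q : Int) (out : Int) : Prop := out = sherlockAndMinimax_alt arr p q
instance (arr : List Int) (p : Int) (q : Int) (out : Int) : Decidable (Spec_sherlockAndMinimax arr p q out) := by unfold Spec_sherlockAndMinimax; infer_instance

-- ===== CLAIM (what is proved, stated in full; the proofs are below) =====
def Claim_equal_sherlockAndMinimax : Prop := ∀ (arr : List Int) (p : Int) (q : Int), Dom_sherlockAndMinimax arr p q → Spec_sherlockAndMinimax arr p q (sherlockAndMinimax arr p q)

-- ===== LEMMAS AND PROOFS =====

-- A's min-tracking loop and B's running min compute the same value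
theorem pvAMinLoop_eq_value (s : List Int) (c : Int) : pvAMinLoop s c = pvValue s c := by
  unfold pvAMinLoop pvValue
  congr 1
  funext m e
  cases m with
  | none => simp [pvOLt]
  | some v =>
    simp only [pvOLt]
    by_cases h : |e - c| < v
    · simp [h, min_eq_right h.le]
    · simp [h, min_eq_left (le_of_not_gt h)]

theorem pvValue_eq_min? (s : List Int) (c : Int) :
    pvValue s c = (s.map (fun e => |e - c|)).min? := by
  unfold pvValue
  cases s with
  | nil => rfl
  | cons a l =>
    simp only [List.foldl_cons, List.map_cons, List.min?_cons']
    have : ∀ (l : List Int) (v : Int),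
        l.foldl (fun m e => match m with | none => some |e - c| | some v => some (min v |e - c|)) (some v)
          = some ((l.map (fun e => |e - c|)).foldl min v) := by
      intro l
      induction l with
      | nil => intro v; rfl
      | cons x xs ih => intro v; simpa using ih (min v |x - c|)
    simpa using this l |a - c|

theorem pvValue_mid (s : List Int) (hs : s.Pairwise (· ≤ ·)) (k : Nat) (hk : k + 1 < s.length)
    (mid : Int) (h1 : s[k] ≤ mid) (h2 : mid ≤ s[k + 1]) :
    pvValue s mid = some (min (mid - s[k]) (s[k + 1] - mid)) := by
  rw [pvValue_eq_min?]
  rw [List.min?_eq_some_iff]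
  constructor
  · -- the claimed minimum is attained at s[k] or s[k+1]
    rcases le_total (mid - s[k]) (s[k + 1] - mid) with h | h
    · rw [min_eq_left h]
      have : |s[k] - mid| = mid - s[k] := by rw [abs_sub_comm]; exact abs_of_nonneg (by omega)
      exact this ▸ List.mem_map_of_mem (List.getElem_mem _)
    · rw [min_eq_right h]
      have : |s[k + 1] - mid| = s[k + 1] - mid := abs_of_nonneg (by omega)
      exact this ▸ List.mem_map_of_mem (List.getElem_mem _)
  · -- every element of s is at distance ≥ the claimed minimum
    intro b hb
    rcases List.mem_map.mp hb with ⟨e, he, rfl⟩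
    rcases List.mem_iff_getElem.mp he with ⟨j, hj, rfl⟩
    have hmono := List.pairwise_iff_getElem.mp hs
    rcases le_or_gt j k with hjk | hjk
    · have hea : s[j] ≤ s[k] := by
        rcases lt_or_eq_of_le hjk with h | h
        · exact hmono j k hj (by omega) h
        · exact h ▸ le_refl _
      have : |s[j] - mid| = mid - s[j] := by rw [abs_sub_comm]; exact abs_of_nonneg (by omega)
      rw [this]
      exact le_trans (min_le_left _ _) (by omega)
    · have heb : s[k + 1] ≤ s[j] := by
        rcases lt_or_eq_of_le (Nat.succ_le_of_lt hjk) with h | h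
        · exact hmono (k + 1) j (by omega) hj h
        · exact h ▸ le_refl _
      have : |s[j] - mid| = s[j] - mid := abs_of_nonneg (by omega)
      rw [this]
      exact le_trans (min_le_right _ _) (by omega)

-- A's index-loop body, as a step over an adjacent pair (a, b) = (arr[i-1], arr[i])
def pvStepP (p q : Int) (st : Int × Option Int) (ab : Int × Int) : Int × Option Int :=
  let mid := PySem.Int.floordiv (ab.2 + ab.1) 2
  if p < mid ∧ mid < q then
    let minimum := some (min (mid - ab.1) (ab.2 - mid))
    if pvOGt minimum st.2 then (mid, minimum) else st
  else st

-- A's fold over range(1, len(arr)) is a fold over the adjacent pairs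
theorem pvLoop2 (s : List Int) (p q : Int) :
    ∀ (n k : Nat) (st : Int × Option Int), s.length ≤ k + 1 + n →
    (PySem.List.pyRange ((k : Int) + 1) (s.length : Int) 1).foldl
      (fun (st : Int × Option Int) i =>
        let mid := PySem.Int.floordiv (PySem.List.pyGetD s i 0 + PySem.List.pyGetD s (i - 1) 0) 2
        if p < mid ∧ mid < q then
          let minimum := some (min (mid - PySem.List.pyGetD s (i - 1) 0) (PySem.List.pyGetD s i 0 - mid))
          if pvOGt minimum st.2 then (mid, minimum) else st
        else st) st
      = ((s.zip s.tail).drop k).foldl (pvStepP p q) st := by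
  intro n
  induction n with
  | zero =>
    intro k st h
    rw [PySem.List.pyRange_one_eq_nil (by omega)]
    rw [List.drop_eq_nil_of_le (by simp [List.length_zip]; omega)]
    rfl
  | succ n ih =>
    intro k st h
    by_cases hlt : k + 1 < s.length
    · rw [PySem.List.pyRange_one_cons (by omega)]
      have hz : k < (s.zip s.tail).length := by
        simp [List.length_zip, List.length_tail]; omega
      rw [List.drop_eq_getElem_cons hz, List.foldl_cons, List.foldl_cons]
      have e1 : PySem.List.pyGetD s ((k : Int) + 1) 0 = s[k + 1] := by
        have : (k : Int) + 1 = ((k + 1 : Nat) : Int) := by omega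
        rw [this, PySem.List.pyGetD_natCast, List.getD_eq_getElem _ _ hlt]
      have e2 : PySem.List.pyGetD s ((k : Int) + 1 - 1) 0 = s[k] := by
        have : (k : Int) + 1 - 1 = ((k : Nat) : Int) := by omega
        rw [this, PySem.List.pyGetD_natCast, List.getD_eq_getElem _ _ (by omega)]
      have hrec : ((k : Int) + 1) + 1 = ((k + 1 : Nat) : Int) + 1 := by omega
      rw [hrec, ih (k + 1) _ (by omega)]
      congr 1
      simp only [e1, e2, pvStepP, List.getElem_zip, List.getElem_tail]
    · rw [PySem.List.pyRange_one_eq_nil (by omega)]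
      rw [List.drop_eq_nil_of_le (by simp [List.length_zip]; omega)]
      rfl

-- fold over a filterMap = fold over the source with the step guarded
theorem pvFoldFilterMap {α β γ : Type} (l : List α) (f : α → Option β) (g : γ → β → γ) (init : γ) :
    (l.filterMap f).foldl g init
      = l.foldl (fun st x => match f x with | some y => g st y | none => st) init := by
  induction l generalizing init with
  | nil => rfl
  | cons a l ih =>
    cases h : f a <;> simp [h, ih]

-- B's fold over the filtered midpoints equals A's guarded fold over the adjacent pairs
theorem pvMidsFold (s : List Int) (p q : Int) (hsorted : s.Pairwise (· ≤ ·)) (init : Int × Option Int) :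
    ((s.zip s.tail).filterMap (fun ab =>
        if p < PySem.Int.floordiv (ab.1 + ab.2) 2 ∧ PySem.Int.floordiv (ab.1 + ab.2) 2 < q
        then some (PySem.Int.floordiv (ab.1 + ab.2) 2) else none)).foldl
      (fun (st : Int × Option Int) c =>
        if pvOGt (pvValue s c) st.2 then (c, pvValue s c) else st) init
      = (s.zip s.tail).foldl (pvStepP p q) init := by
  rw [pvFoldFilterMap]
  apply PySem.List.foldl_congr_mem
  intro st ab hab
  rcases List.mem_iff_getElem.mp hab with ⟨k, hk, hget⟩
  have hzl : (s.zip s.tail).length = s.length - 1 := by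
    simp [List.length_zip, List.length_tail]
  have hk1 : k + 1 < s.length := by omega
  have hab1 : ab.1 = s[k] := by
    rw [← hget]; simp [List.getElem_zip]
  have hab2 : ab.2 = s[k + 1] := by
    rw [← hget]; simp [List.getElem_zip, List.getElem_tail]
  have hle : ab.1 ≤ ab.2 := by
    rw [hab1, hab2]
    exact (List.pairwise_iff_getElem.mp hsorted) k (k + 1) (by omega) hk1 (by omega)
  have hmid := PySem.Int.floordiv_two_mid_bounds hle
  have hcomm : ab.2 + ab.1 = ab.1 + ab.2 := by ring
  simp only [pvStepP, hcomm]
  have hfd : PySem.Int.floordiv (ab.1 + ab.2) 2 = (ab.1 + ab.2) / 2 :=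
    PySem.Int.floordiv_eq_ediv_of_pos (by norm_num)
  by_cases hin : p < (ab.1 + ab.2) / 2 ∧ (ab.1 + ab.2) / 2 < q
  · have hv : pvValue s ((ab.1 + ab.2) / 2)
        = some (min ((ab.1 + ab.2) / 2 - ab.1) (ab.2 - (ab.1 + ab.2) / 2)) := by
      rw [← hfd]
      rw [hab1, hab2] at hmid ⊢
      exact pvValue_mid s hsorted k hk1 _ hmid.1 hmid.2
    simp [hin, hv]
  · simp [hin]

theorem sherlockAndMinimax_spec : Claim_equal_sherlockAndMinimax := by
  unfold Claim_equal_sherlockAndMinimax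
  intro arr p q _
  unfold Spec_sherlockAndMinimax sherlockAndMinimax sherlockAndMinimax_alt pvMaxKey
  simp only [pvAMinLoop_eq_value]
  set s := PySem.List.sorted arr (fun x => x) false with hs
  have hsorted : s.Pairwise (· ≤ ·) := PySem.List.sorted_pairwise arr (fun x => x)
  -- rewrite A's index loop into the pair fold
  have hloop := pvLoop2 s p q s.length 0 (p, pvValue s p) (by omega)
  have h01 : ((0 : Nat) : Int) + 1 = (1 : Int) := by norm_num
  rw [h01] at hloop
  rw [hloop, List.drop_zero]
  -- rewrite B's fold over the filtered midpoints into the same pair fold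
  rw [List.foldl_append, pvMidsFold s p q hsorted]
  -- the final q step
  simp only [List.foldl_cons, List.foldl_nil]
  split <;> rfl
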